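-- pv_equiv track=rewrite | github.com/coherent17/Communication-Networks-Laboratory | Lab0/src/0811562_2.py | average_difference
-- ===== SOURCE A (Python) =====
-- def average_difference(nums, numsSize):
--     return_index = 0
--     left = 0
--     right = sum(nums)
--     min_value = float('inf')
--
--     for i in range(numsSize):
--         left += nums[i]
--         right -= nums[i]
--
--         left_average = left//(i + 1)
--
--         if i + 1 == numsSize:
--             right_average = 0
--         else:
--             right_average = right//(numsSize - (i + 1))
--
--         result = abs(left_average - right_average)
--
--         if result < min_value:
--             min_value = result
--             return_index = i
--
--     return return_index
-- ===== SOURCE B (Python) =====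
-- def average_difference(nums, numsSize):
--     # Divide-and-conquer tournament: recursively find the first-minimal
--     # (index, key) over an index interval, carrying each segment's sum so no
--     # prefix table or running accumulator is needed.
--     if numsSize <= 0:
--         return 0
--     total = sum(nums)
--
--     def best(lo, hi, left_before):
--         # returns (best index, its key, sum of nums[lo:hi]) for interval [lo, hi)
--         if hi - lo == 1:
--             left = left_before + nums[lo]
--             left_avg = left // (lo + 1)
--             right_avg = 0 if lo + 1 == numsSize else (total - left) // (numsSize - lo - 1)
--             return (lo, abs(left_avg - right_avg), nums[lo])
--         mid = (lo + hi) // 2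
--         li, lv, ls = best(lo, mid, left_before)
--         ri, rv, rs = best(mid, hi, left_before + ls)
--         if lv <= rv:
--             return (li, lv, ls + rs)
--         return (ri, rv, ls + rs)
--
--     return best(0, numsSize, 0)[0]
-- ===== Notes on version B (the rewrite author's own statement) =====
-- stated objective: alternative
-- what changed: B replaces A's single left-to-right running-sum loop with a manual strict-< argmin tracker by a divide-and-conquer tournament: a recursion over index intervals that returns the first-minimal (index, key) of each half plus the segment's sum (carried down as the left context), combined with a tie-to-the-left comparison.
import Mathlib
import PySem

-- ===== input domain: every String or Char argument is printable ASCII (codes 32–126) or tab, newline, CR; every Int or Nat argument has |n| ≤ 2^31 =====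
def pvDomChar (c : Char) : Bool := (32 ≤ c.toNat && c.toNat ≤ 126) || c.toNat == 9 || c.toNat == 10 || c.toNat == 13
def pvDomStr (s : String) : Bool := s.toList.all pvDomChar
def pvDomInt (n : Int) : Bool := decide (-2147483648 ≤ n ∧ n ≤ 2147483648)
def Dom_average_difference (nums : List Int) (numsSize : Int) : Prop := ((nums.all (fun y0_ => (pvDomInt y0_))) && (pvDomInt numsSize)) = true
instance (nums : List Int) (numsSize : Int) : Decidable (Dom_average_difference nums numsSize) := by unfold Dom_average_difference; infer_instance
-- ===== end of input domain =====

-- B replaces A's single left-to-right running-sum argmin loop by a divide-and-conquer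
-- tournament over index intervals that carries each segment's sum (objective: alternative).

-- ===== PORT A =====
-- loop body of A: state = (return_index, left, right, min_value); min_value = none models float('inf')
def adStepA (nums : List Int) (numsSize : Int)
    (st : Int × Int × Int × Option Int) (i : Int) : Int × Int × Int × Option Int :=
  let left := st.2.1 + PySem.List.pyGetD nums i 0
  let right := st.2.2.1 - PySem.List.pyGetD nums i 0
  let left_average := PySem.Int.floordiv left (i + 1)
  let right_average :=
    if i + 1 = numsSize then 0 else PySem.Int.floordiv right (numsSize - (i + 1))
  let result := |left_average - right_average|
  match st.2.2.2 with
  | none => (i, left, right, some result)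
  | some mv => if result < mv then (i, left, right, some result) else (st.1, left, right, some mv)

def average_difference (nums : List Int) (numsSize : Int) : Int :=
  ((PySem.List.pyRange 0 numsSize 1).foldl (adStepA nums numsSize) (0, 0, nums.sum, none)).1

-- ===== PORT B =====
-- B's recursive helper best(lo, hi, left_before): first-minimal (index, key) over [lo, hi)
-- plus the sum of nums[lo:hi]; indices are Nat (B only ever calls it with 0 ≤ lo < hi).
def adBestB (nums : List Int) (numsSize total : Int) (lo hi : Nat) (leftBefore : Int) :
    Int × Int × Int :=
  if _h : hi - lo ≤ 1 then
    let left := leftBefore + PySem.List.pyGetD nums (lo : Int) 0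
    let left_avg := PySem.Int.floordiv left ((lo : Int) + 1)
    let right_avg := if (lo : Int) + 1 = numsSize then 0
      else PySem.Int.floordiv (total - left) (numsSize - ((lo : Int) + 1))
    ((lo : Int), |left_avg - right_avg|, PySem.List.pyGetD nums (lo : Int) 0)
  else
    let mid := (lo + hi) / 2
    let L := adBestB nums numsSize total lo mid leftBefore
    let R := adBestB nums numsSize total mid hi (leftBefore + L.2.2)
    if L.2.1 ≤ R.2.1 then (L.1, L.2.1, L.2.2 + R.2.2)
    else (R.1, R.2.1, L.2.2 + R.2.2)
  termination_by hi - lo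
  decreasing_by all_goals omega

def average_difference_alt (nums : List Int) (numsSize : Int) : Int :=
  if numsSize ≤ 0 then 0
  else (adBestB nums numsSize nums.sum 0 numsSize.toNat 0).1

-- ===== PRECONDITION & SPEC =====
-- Pre_ excludes exactly the inputs where A raises IndexError: numsSize > len(nums).
def Pre_average_difference (nums : List Int) (numsSize : Int) : Prop :=
  numsSize ≤ (nums.length : Int)
instance (nums : List Int) (numsSize : Int) : Decidable (Pre_average_difference nums numsSize) := by
  unfold Pre_average_difference; infer_instance

def pvWitness_average_difference : List Int × Int := ([4, 2, 7, -3, 5], 5)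

def Spec_average_difference (nums : List Int) (numsSize : Int) (out : Int) : Prop := out = average_difference_alt nums numsSize
instance (nums : List Int) (numsSize : Int) (out : Int) : Decidable (Spec_average_difference nums numsSize out) := by unfold Spec_average_difference; infer_instance

-- ===== CLAIM (what is proved, stated in full; the proofs are below) =====
def Claim_equal_average_difference : Prop := ∀ (nums : List Int) (numsSize : Int), Dom_average_difference nums numsSize → Pre_average_difference nums numsSize → Spec_average_difference nums numsSize (average_difference nums numsSize)

-- ===== LEMMAS AND PROOFS =====

-- prefix sum of nums up to and including (Int) index i
def adPre (nums : List Int) (i : Int) : Int := (nums.take (i.toNat + 1)).sum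

-- the common key: A's per-iteration |left_average - right_average| as a pure function of i
def adKey (nums : List Int) (n : Int) (i : Int) : Int :=
  |PySem.Int.floordiv (adPre nums i) (i + 1) -
    (if i + 1 = n then 0 else PySem.Int.floordiv (nums.sum - adPre nums i) (n - (i + 1)))|

lemma adTakeSucc (nums : List Int) (k : Nat) (hk : k < nums.length) :
    (nums.take (k + 1)).sum = (nums.take k).sum + PySem.List.pyGetD nums (k : Int) 0 := by
  rw [PySem.List.pyGetD_natCast, List.take_add_one, List.sum_append]
  simp [List.getD, List.getElem?_eq_getElem hk]

lemma adPre_natCast (nums : List Int) (k : Nat) :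
    adPre nums (k : Int) = (nums.take (k + 1)).sum := by
  simp [adPre]

-- min? over a list extended by one element on the right: the two step cases
lemma adMinSnoc_none {g : Int → Int} (r : List Int) (x : Int)
    (h : PySem.List.min? r g = none) :
    PySem.List.min? (r ++ [x]) g = some x := by
  rw [PySem.List.min?] at h ⊢
  rw [List.foldl_append, h]
  rfl

lemma adMinSnoc_some {g : Int → Int} (r : List Int) (x m : Int)
    (h : PySem.List.min? r g = some m) :
    PySem.List.min? (r ++ [x]) g = if g x < g m then some x else some m := by
  rw [PySem.List.min?] at h ⊢
  rw [List.foldl_append, h]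
  rfl

-- tie-to-the-left combination of two optional minima (proof helper)
def adComb (g : Int → Int) : Option Int → Option Int → Option Int
  | none, r => r
  | some a, none => some a
  | some a, some b => if g a ≤ g b then some a else some b

-- min? over a concatenation = tie-to-the-left combination of the two min?s
lemma adMinAppend (g : Int → Int) (xs ys : List Int) :
    PySem.List.min? (xs ++ ys) g = adComb g (PySem.List.min? xs g) (PySem.List.min? ys g) := by
  induction ys using List.reverseRecOn with
  | nil =>
    rw [List.append_nil, show PySem.List.min? ([] : List Int) g = none from rfl]
    cases h : PySem.List.min? xs g <;> rfl
  | append_singleton r x ih =>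
    rw [← List.append_assoc]
    cases hx : PySem.List.min? xs g with
    | none =>
      simp only [hx, adComb] at ih ⊢
      cases hr : PySem.List.min? r g with
      | none => rw [adMinSnoc_none _ _ (hr ▸ ih), adMinSnoc_none _ _ hr]
      | some b => rw [adMinSnoc_some _ _ _ (hr ▸ ih), adMinSnoc_some _ _ _ hr]
    | some a =>
      simp only [hx] at ih ⊢
      cases hr : PySem.List.min? r g with
      | none =>
        simp only [hr, adComb] at ih
        rw [adMinSnoc_some _ _ _ ih, adMinSnoc_none _ _ hr]
        by_cases h1 : g x < g a
        · rw [if_pos h1]; simp only [adComb]; rw [if_neg (by omega)]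
        · rw [if_neg h1]; simp only [adComb]; rw [if_pos (by omega)]
      | some b =>
        simp only [hr, adComb] at ih
        rw [adMinSnoc_some _ _ _ hr]
        by_cases hab : g a ≤ g b
        · rw [if_pos hab] at ih
          rw [adMinSnoc_some _ _ _ ih]
          by_cases hxb : g x < g b
          · rw [if_pos hxb]
            simp only [adComb]
            by_cases hxa : g x < g a
            · rw [if_pos hxa, if_neg (by omega)]
            · rw [if_neg hxa, if_pos (by omega)]
          · rw [if_neg hxb]
            simp only [adComb]
            rw [if_pos hab]
            by_cases hxa : g x < g a
            · exact absurd (by omega : g x < g b) hxb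
            · rw [if_neg hxa]
        · rw [if_neg hab] at ih
          rw [adMinSnoc_some _ _ _ ih]
          by_cases hxb : g x < g b
          · rw [if_pos hxb]
            simp only [adComb]
            rw [if_neg (by omega : ¬ g a ≤ g x)]
          · rw [if_neg hxb]
            simp only [adComb]
            rw [if_neg hab]

-- A's loop invariant: the state after the first k iterations
lemma adLoopA (nums : List Int) (n : Int) (k : Nat)
    (hk : k ≤ nums.length) (hkn : (k : Int) ≤ n) :
    (PySem.List.pyRange 0 (k : Int) 1).foldl (adStepA nums n) (0, 0, nums.sum, none)
      = ((PySem.List.min? (PySem.List.pyRange 0 (k : Int) 1) (adKey nums n)).getD 0,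
          (nums.take k).sum, nums.sum - (nums.take k).sum,
          (PySem.List.min? (PySem.List.pyRange 0 (k : Int) 1) (adKey nums n)).map (adKey nums n)) := by
  induction k with
  | zero => simp [PySem.List.pyRange_one_eq_nil, PySem.List.min?]
  | succ k ih =>
    have hk' : k ≤ nums.length := Nat.le_of_succ_le hk
    have hkn' : (k : Int) ≤ n := by push_cast at hkn ⊢; omega
    have hcast : ((k + 1 : Nat) : Int) = (k : Int) + 1 := by push_cast; ring
    rw [hcast, PySem.List.pyRange_one_succ_right (by positivity), List.foldl_append,
      ih hk' hkn']
    simp only [List.foldl_cons, List.foldl_nil]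
    rw [adStepA]
    simp only
    have htk : (nums.take (k + 1)).sum
        = (nums.take k).sum + PySem.List.pyGetD nums (k : Int) 0 := adTakeSucc nums k (by omega)
    have hkey : |PySem.Int.floordiv ((nums.take k).sum + PySem.List.pyGetD nums (k : Int) 0) ((k : Int) + 1) -
        (if (k : Int) + 1 = n then 0
         else PySem.Int.floordiv (nums.sum - (nums.take k).sum - PySem.List.pyGetD nums (k : Int) 0)
           (n - ((k : Int) + 1)))| = adKey nums n (k : Int) := by
      rw [adKey]
      have h1 : (nums.take k).sum + PySem.List.pyGetD nums (k : Int) 0 = adPre nums (k : Int) := by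
        rw [adPre_natCast]; omega
      have h2 : nums.sum - (nums.take k).sum - PySem.List.pyGetD nums (k : Int) 0
           = nums.sum - adPre nums (k : Int) := by rw [adPre_natCast]; omega
      rw [h1, h2]
    cases hm : PySem.List.min? (PySem.List.pyRange 0 (k : Int) 1) (adKey nums n) with
    | none =>
      rw [adMinSnoc_none _ _ hm]
      simp only [Option.map_none, Option.getD_some, Option.map_some, Prod.mk.injEq]
      refine ⟨?_, ?_, ?_, ?_⟩ <;> first | omega | (rw [hkey]) | trivial
    | some m =>
      simp only [Option.map_some]
      rw [adMinSnoc_some _ _ _ hm]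
      by_cases hlt : adKey nums n (k : Int) < adKey nums n m
      · rw [← hkey] at hlt
        simp only [if_pos hlt]
        rw [hkey] at hlt
        simp only [if_pos hlt, Option.getD_some, Option.map_some, Prod.mk.injEq]
        refine ⟨?_, ?_, ?_, ?_⟩ <;> first | omega | (rw [hkey]) | trivial
      · rw [← hkey] at hlt
        simp only [if_neg hlt]
        rw [hkey] at hlt
        simp only [if_neg hlt, Option.getD_some, Option.map_some, Prod.mk.injEq]
        refine ⟨?_, ?_, ?_, ?_⟩ <;> first | omega | trivial

-- B's divide-and-conquer invariant: on [lo, hi) with the correct left context it returns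
-- the first-minimal index of adKey over pyRange lo hi, its key, and the segment sum.
lemma adBestB_spec (nums : List Int) (n : Int) :
    ∀ fuel lo hi : Nat, hi - lo ≤ fuel → lo < hi → hi ≤ nums.length → (hi : Int) ≤ n →
    ∃ m : Int,
      PySem.List.min? (PySem.List.pyRange (lo : Int) (hi : Int) 1) (adKey nums n) = some m ∧
      adBestB nums n nums.sum lo hi ((nums.take lo).sum)
        = (m, adKey nums n m, (nums.take hi).sum - (nums.take lo).sum) := by
  intro fuel
  induction fuel with
  | zero => intro lo hi h1 h2 _ _; omega
  | succ fuel ih =>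
    intro lo hi hfuel hlt hlen hn
    by_cases hleaf : hi - lo ≤ 1
    · -- leaf: hi = lo + 1
      have hhi : hi = lo + 1 := by omega
      subst hhi
      have hcast : ((lo + 1 : Nat) : Int) = (lo : Int) + 1 := by push_cast; ring
      have htk := adTakeSucc nums lo (by omega)
      have hk : |PySem.Int.floordiv ((nums.take lo).sum + PySem.List.pyGetD nums (lo : Int) 0) ((lo : Int) + 1) -
          (if (lo : Int) + 1 = n then 0
           else PySem.Int.floordiv (nums.sum - ((nums.take lo).sum + PySem.List.pyGetD nums (lo : Int) 0)) (n - ((lo : Int) + 1)))|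
          = adKey nums n (lo : Int) := by
        rw [adKey, adPre_natCast, htk]
      refine ⟨(lo : Int), ?_, ?_⟩
      · rw [hcast, PySem.List.pyRange_one_singleton]
        rfl
      · rw [adBestB, dif_pos hleaf]
        dsimp only
        rw [hk, show PySem.List.pyGetD nums (lo : Int) 0
            = (nums.take (lo + 1)).sum - (nums.take lo).sum from by omega]
    · -- split at mid
      have hmid1 : lo < (lo + hi) / 2 := by omega
      have hmid2 : (lo + hi) / 2 < hi := by omega
      obtain ⟨m1, hm1, hL⟩ := ih lo ((lo + hi) / 2) (by omega) hmid1 (by omega)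
        (by push_cast at hn ⊢; omega)
      obtain ⟨m2, hm2, hR⟩ := ih ((lo + hi) / 2) hi (by omega) hmid2 hlen hn
      have hctx : (nums.take lo).sum + ((nums.take ((lo + hi) / 2)).sum - (nums.take lo).sum)
          = (nums.take ((lo + hi) / 2)).sum := by omega
      have hsplit : PySem.List.pyRange (lo : Int) (hi : Int) 1
          = PySem.List.pyRange (lo : Int) (((lo + hi) / 2 : Nat) : Int) 1
            ++ PySem.List.pyRange (((lo + hi) / 2 : Nat) : Int) (hi : Int) 1 :=
        PySem.List.pyRange_one_append _ _ _ (by exact_mod_cast Nat.le_of_lt hmid1)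
          (by exact_mod_cast Nat.le_of_lt hmid2)
      rw [adBestB, dif_neg hleaf]
      dsimp only
      rw [hL]
      dsimp only
      rw [hctx, hR]
      dsimp only
      rw [hsplit, adMinAppend, hm1, hm2]
      simp only [adComb]
      by_cases hle : adKey nums n m1 ≤ adKey nums n m2
      · refine ⟨m1, by rw [if_pos hle], ?_⟩
        rw [if_pos hle, show (nums.take ((lo + hi) / 2)).sum - (nums.take lo).sum
            + ((nums.take hi).sum - (nums.take ((lo + hi) / 2)).sum)
            = (nums.take hi).sum - (nums.take lo).sum from by omega]
      · refine ⟨m2, by rw [if_neg hle], ?_⟩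
        rw [if_neg hle, show (nums.take ((lo + hi) / 2)).sum - (nums.take lo).sum
            + ((nums.take hi).sum - (nums.take ((lo + hi) / 2)).sum)
            = (nums.take hi).sum - (nums.take lo).sum from by omega]

-- ===== VERDICT (by name: the statement is the Claim_ definition above) =====
theorem average_difference_spec : Claim_equal_average_difference := by
  intro nums n _ hpre
  unfold Spec_average_difference average_difference average_difference_alt
  by_cases hn : n ≤ 0
  · rw [if_pos hn, PySem.List.pyRange_one_eq_nil hn]
    simp
  · rw [if_neg hn]
    have h0 : 0 < n := lt_of_not_ge hn
    have hcast : ((n.toNat : Nat) : Int) = n := Int.toNat_of_nonneg (le_of_lt h0)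
    have hlen : n.toNat ≤ nums.length := by
      unfold Pre_average_difference at hpre; omega
    have hA := adLoopA nums n n.toNat hlen (by omega)
    rw [hcast] at hA
    rw [hA]
    obtain ⟨m, hm, hB⟩ := adBestB_spec nums n (n.toNat + 1) 0 n.toNat (by omega)
      (by omega) hlen (by omega)
    simp only [Nat.cast_zero, List.take_zero, List.sum_nil] at hm hB
    rw [hcast] at hm
    rw [hB, hm]
    rfl
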